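-- pv_equiv track=rewrite | github.com/yuhe-dev/clip_dinoiser | visualize_feature_landscape.py | _pick_image_rel
-- ===== SOURCE A (Python) =====
-- from typing import Dict, List, Sequence, Tuple
--
-- def _pick_image_rel(requested_image_rel: str, indexed_bundles: Sequence[Dict[str, Dict[str, object]]]) -> str:
--     if requested_image_rel:
--         return requested_image_rel
--     common = set(indexed_bundles[0].keys())
--     for bundle in indexed_bundles[1:]:
--         common &= set(bundle.keys())
--     if not common:
--         raise ValueError("No shared image_rel found across quality, difficulty, and coverage bundles.")
--     return sorted(common)[0]
-- ===== SOURCE B (Python) =====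
-- def _pick_image_rel(requested_image_rel, indexed_bundles):
--     if requested_image_rel:
--         return requested_image_rel
--     rest = indexed_bundles[1:]
--     best = None
--     for key in indexed_bundles[0]:
--         if (best is None or key < best) and all(key in bundle for bundle in rest):
--             best = key
--     if best is None:
--         raise ValueError("No shared image_rel found across quality, difficulty, and coverage bundles.")
--     return best
-- ===== Notes on version B (the rewrite author's own statement) =====
-- stated objective: simpler
-- what changed: Replaced the set-intersection accumulation plus full sort with a single pass over the first bundle's keys that keeps the lexicographically smallest key present in every other bundle.
import Mathlib
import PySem

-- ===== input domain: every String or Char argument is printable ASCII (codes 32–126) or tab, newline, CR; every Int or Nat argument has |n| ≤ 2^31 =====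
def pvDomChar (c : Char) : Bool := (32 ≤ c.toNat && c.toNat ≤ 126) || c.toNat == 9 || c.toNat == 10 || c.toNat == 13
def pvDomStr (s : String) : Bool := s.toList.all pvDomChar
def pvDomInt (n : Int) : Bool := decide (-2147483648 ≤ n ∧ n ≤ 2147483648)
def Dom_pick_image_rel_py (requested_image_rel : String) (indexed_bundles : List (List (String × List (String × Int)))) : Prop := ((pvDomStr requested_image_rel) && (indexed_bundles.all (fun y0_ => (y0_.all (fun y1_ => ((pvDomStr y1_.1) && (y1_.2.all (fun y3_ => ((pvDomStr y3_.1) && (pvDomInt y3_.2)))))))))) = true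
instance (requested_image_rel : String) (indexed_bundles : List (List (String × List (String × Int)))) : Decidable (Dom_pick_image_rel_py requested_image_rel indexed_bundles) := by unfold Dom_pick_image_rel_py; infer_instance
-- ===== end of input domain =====

-- B replaces A's set-intersection accumulation plus full sort by a single pass over the
-- first bundle's keys that keeps the smallest key present in every other bundle (simpler).

-- ===== PORT A =====
def pick_image_rel_py (requested_image_rel : String) (indexed_bundles : List (List (String × List (String × Int)))) : String :=
  if requested_image_rel ≠ "" then requested_image_rel
  else
    -- indexed_bundles[0]: IndexError on [] is excluded by Pre_
    let first := (PySem.List.pyGet? indexed_bundles 0).getD []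
    let common := (PySem.List.slice indexed_bundles (some 1)).foldl
      (fun c bundle => PySem.Set.inter c (PySem.Set.ofList (bundle.map Prod.fst)))
      (PySem.Set.ofList (first.map Prod.fst))
    if common = [] then ""  -- ValueError path, excluded by Pre_
    else (PySem.List.pyGet? (PySem.List.sorted common (fun x => x)) 0).getD ""

-- ===== PORT B =====
def pick_image_rel_py_alt (requested_image_rel : String) (indexed_bundles : List (List (String × List (String × Int)))) : String :=
  if requested_image_rel ≠ "" then requested_image_rel
  else
    let rest := PySem.List.slice indexed_bundles (some 1)
    -- iterating over indexed_bundles[0]: IndexError on [] is excluded by Pre_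
    let first := (PySem.List.pyGet? indexed_bundles 0).getD []
    let best := first.foldl
      (fun best kv =>
        if (match best with | none => true | some b => decide (kv.1 < b)) &&
           rest.all (fun bundle => bundle.any (fun kv' => kv'.1 == kv.1))
        then some kv.1 else best)
      (none : Option String)
    best.getD ""  -- best = none is the ValueError path, excluded by Pre_

-- ===== PRECONDITION & SPEC =====
-- Pre_ excludes exactly the inputs where A raises: empty bundle list (IndexError) and an
-- empty key intersection (ValueError), both only when requested_image_rel is empty.
def Pre_pick_image_rel_py (requested_image_rel : String) (indexed_bundles : List (List (String × List (String × Int)))) : Prop :=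
  requested_image_rel ≠ "" ∨
    (indexed_bundles ≠ [] ∧
      ((indexed_bundles.headD []).any (fun kv =>
        indexed_bundles.all (fun b => b.any (fun kv' => kv'.1 == kv.1)))) = true)
instance (requested_image_rel : String) (indexed_bundles : List (List (String × List (String × Int)))) : Decidable (Pre_pick_image_rel_py requested_image_rel indexed_bundles) := by unfold Pre_pick_image_rel_py; infer_instance

def pvWitness_pick_image_rel_py : String × (List (List (String × List (String × Int)))) :=
  ("", [[("b", [("x", 1)]), ("a", [])], [("a", [])]])

def Spec_pick_image_rel_py (requested_image_rel : String) (indexed_bundles : List (List (String × List (String × Int)))) (out : String) : Prop := out = pick_image_rel_py_alt requested_image_rel indexed_bundles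
instance (requested_image_rel : String) (indexed_bundles : List (List (String × List (String × Int)))) (out : String) : Decidable (Spec_pick_image_rel_py requested_image_rel indexed_bundles out) := by unfold Spec_pick_image_rel_py; infer_instance

-- ===== CLAIM (what is proved, stated in full; the proofs are below) =====
def Claim_equal_pick_image_rel_py : Prop := ∀ (requested_image_rel : String) (indexed_bundles : List (List (String × List (String × Int)))), Dom_pick_image_rel_py requested_image_rel indexed_bundles → Pre_pick_image_rel_py requested_image_rel indexed_bundles → Spec_pick_image_rel_py requested_image_rel indexed_bundles (pick_image_rel_py requested_image_rel indexed_bundles)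

-- ===== LEMMAS AND PROOFS =====

-- membership in the intersection fold of port A
theorem mem_foldl_inter (rest : List (List (String × List (String × Int)))) (s : PySem.Set String) (k : String) :
    k ∈ rest.foldl (fun c bundle => PySem.Set.inter c (PySem.Set.ofList (bundle.map Prod.fst))) s ↔
      k ∈ s ∧ ∀ b ∈ rest, k ∈ b.map Prod.fst := by
  induction rest generalizing s with
  | nil => simp
  | cons b t ih =>
    simp [List.foldl_cons, ih, PySem.Set.mem_inter, PySem.Set.mem_ofList, and_assoc]

-- port B's loop computes min? of the qualifying keys
theorem foldl_best_eq_min? (q : String → Bool) (l : List String) (acc : Option String) :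
    l.foldl (fun best k =>
        if (match best with | none => true | some b => decide (k < b)) && q k then some k else best) acc =
      acc.elim (PySem.List.min? (l.filter q) (fun y => y))
        (fun a => some ((l.filter q).foldl min a)) := by
  induction l generalizing acc with
  | nil => cases acc <;> simp [PySem.List.min?]
  | cons x t ih =>
    simp only [List.foldl_cons, List.filter_cons]
    by_cases hq : q x = true
    · cases acc with
      | none =>
        simp only [hq, Bool.and_true, if_true]
        rw [ih]
        simp [PySem.List.min?_id_cons]
      | some a =>
        by_cases h : x < a
        · simp only [hq, h, decide_true, Bool.and_true, if_true]
          rw [ih]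
          simp [min_eq_right (le_of_lt h)]
        · simp only [hq, h, decide_false, Bool.false_and, if_false]
          rw [ih]
          simp [min_eq_left (le_of_not_gt h)]
    · cases acc with
      | none =>
        simp only [hq, Bool.and_false, if_false]
        rw [ih]
        simp [hq]
      | some a =>
        simp only [hq, Bool.and_false, if_false]
        rw [ih]
        simp [hq]

-- min? with identity key depends only on membership
theorem min?_id_congr_mem (l1 l2 : List String) (h : ∀ k, k ∈ l1 ↔ k ∈ l2) :
    PySem.List.min? l1 (fun y => y) = PySem.List.min? l2 (fun y => y) := by
  cases h1 : PySem.List.min? l1 (fun y => y) with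
  | none =>
    rw [PySem.List.min?_eq_none_iff] at h1
    cases h2 : PySem.List.min? l2 (fun y => y) with
    | none => rfl
    | some m =>
      have := PySem.List.min?_mem h2
      rw [← h] at this
      simp [h1] at this
  | some m =>
    cases h2 : PySem.List.min? l2 (fun y => y) with
    | none =>
      rw [PySem.List.min?_eq_none_iff] at h2
      have := PySem.List.min?_mem h1
      rw [h] at this
      simp [h2] at this
    | some m' =>
      have hm := PySem.List.min?_mem h1
      have hm' := PySem.List.min?_mem h2
      have h1' := PySem.List.min?_isMin h1
      have h2' := PySem.List.min?_isMin h2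
      exact congrArg some (le_antisymm (h1' m' ((h m').mpr hm')) (h2' m ((h m).mp hm)))

-- head of sorted (id key) is min?
theorem head_sorted_eq_min? (l : List String) (m : String) (t : List String)
    (h : PySem.List.sorted l (fun x => x) = m :: t) :
    PySem.List.min? l (fun y => y) = some m := by
  have hmem : m ∈ l := by
    have : m ∈ PySem.List.sorted l (fun x => x) := by simp [h]
    rwa [PySem.List.mem_sorted] at this
  have hle := PySem.List.key_head_sorted_le l (fun x => x) h
  cases h1 : PySem.List.min? l (fun y => y) with
  | none =>
    rw [PySem.List.min?_eq_none_iff] at h1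
    simp [h1] at hmem
  | some m' =>
    have := PySem.List.min?_isMin h1
    exact congrArg some (le_antisymm (this m hmem) (hle m' (PySem.List.min?_mem h1)))

-- the core equality between A's "intersect, sort, take head" and B's single-pass minimum
theorem pick_core (first : List (String × List (String × Int)))
    (rest : List (List (String × List (String × Int)))) :
    (if rest.foldl (fun c bundle => PySem.Set.inter c (PySem.Set.ofList (bundle.map Prod.fst)))
          (PySem.Set.ofList (first.map Prod.fst)) = [] then ""
     else (PySem.List.pyGet? (PySem.List.sorted
            (rest.foldl (fun c bundle => PySem.Set.inter c (PySem.Set.ofList (bundle.map Prod.fst)))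
              (PySem.Set.ofList (first.map Prod.fst))) (fun x => x)) 0).getD "") =
    (first.foldl
      (fun best kv =>
        if (match best with | none => true | some b => decide (kv.1 < b)) &&
           rest.all (fun bundle => bundle.any (fun kv' => kv'.1 == kv.1))
        then some kv.1 else best)
      (none : Option String)).getD "" := by
  set q : String → Bool := fun k => rest.all (fun bundle => bundle.any (fun kv' => kv'.1 == k)) with hqdef
  have hb : first.foldl
      (fun best kv =>
        if (match best with | none => true | some b => decide (kv.1 < b)) &&
           rest.all (fun bundle => bundle.any (fun kv' => kv'.1 == kv.1))
        then some kv.1 else best) (none : Option String)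
      = PySem.List.min? ((first.map Prod.fst).filter q) (fun y => y) := by
    have h2 := foldl_best_eq_min? q (first.map Prod.fst) none
    rw [List.foldl_map] at h2
    exact h2
  set common := rest.foldl (fun c bundle => PySem.Set.inter c (PySem.Set.ofList (bundle.map Prod.fst)))
      (PySem.Set.ofList (first.map Prod.fst)) with hcommon
  have hmm : ∀ k, k ∈ common ↔ k ∈ (first.map Prod.fst).filter q := by
    intro k
    rw [hcommon, mem_foldl_inter, PySem.Set.mem_ofList, List.mem_filter]
    constructor
    · rintro ⟨h1, h2⟩
      refine ⟨h1, ?_⟩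
      simp only [hqdef, List.all_eq_true]
      intro b hbmem
      have := h2 b hbmem
      simp only [List.mem_map] at this
      obtain ⟨kv, hkv, hfst⟩ := this
      simp only [List.any_eq_true]
      exact ⟨kv, hkv, by simp [hfst]⟩
    · rintro ⟨h1, h2⟩
      refine ⟨h1, ?_⟩
      intro b hbmem
      simp only [hqdef, List.all_eq_true] at h2
      have := h2 b hbmem
      simp only [List.any_eq_true] at this
      obtain ⟨kv, hkv, he⟩ := this
      simp only [beq_iff_eq] at he
      exact List.mem_map.mpr ⟨kv, hkv, he⟩
  have hmin : PySem.List.min? common (fun y => y)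
      = PySem.List.min? ((first.map Prod.fst).filter q) (fun y => y) :=
    min?_id_congr_mem _ _ hmm
  by_cases hc : common = []
  · rw [if_pos hc, hb, ← hmin, hc]
    rfl
  · rw [if_neg hc]
    cases hs : PySem.List.sorted common (fun x => x) with
    | nil => exact absurd ((PySem.List.sorted_eq_nil_iff _ _ _).mp hs) hc
    | cons m t =>
      rw [hb, ← hmin, head_sorted_eq_min? common m t hs]
      simp [PySem.List.pyGet?, PySem.List.pyIdx?]

-- ===== VERDICT (by name: the statement is the Claim_ definition above) =====
theorem pick_image_rel_py_spec : Claim_equal_pick_image_rel_py := by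
  intro req bundles _hdom _hpre
  unfold Spec_pick_image_rel_py pick_image_rel_py pick_image_rel_py_alt
  by_cases hreq : req ≠ ""
  · simp [hreq]
  · rw [if_neg hreq, if_neg hreq]
    exact pick_core ((PySem.List.pyGet? bundles 0).getD []) (PySem.List.slice bundles (some 1))
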